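-- pv_equiv track=rewrite | github.com/DIAGNijmegen/pathology-tiger-algorithm-example | evaluations/eval_segm.py | _get_classnames_from_labelmap
-- ===== SOURCE A (Python) =====
-- def _get_classnames_from_labelmap(class_map):
--     class_names = []
--     keys = sorted(class_map.keys())
--     for key in keys:
--         cname = class_map[key]
--         if cname not in class_names:
--             class_names.append(cname)
--     return class_names
-- ===== SOURCE B (Python) =====
-- def _get_classnames_from_labelmap(class_map):
--     firstkey = {}
--     for key, cname in class_map.items():
--         if cname not in firstkey or key < firstkey[cname]:
--             firstkey[cname] = key
--     return sorted(firstkey, key=lambda cname: firstkey.get(cname, 0))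
-- ===== Notes on version B (the rewrite author's own statement) =====
-- stated objective: faster
-- what changed: Instead of sorting all keys and dedup-scanning a growing list of seen values, B makes one pass over the items building a value-to-minimum-key dict index and then sorts only the distinct values by that minimum key.
import Mathlib
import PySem

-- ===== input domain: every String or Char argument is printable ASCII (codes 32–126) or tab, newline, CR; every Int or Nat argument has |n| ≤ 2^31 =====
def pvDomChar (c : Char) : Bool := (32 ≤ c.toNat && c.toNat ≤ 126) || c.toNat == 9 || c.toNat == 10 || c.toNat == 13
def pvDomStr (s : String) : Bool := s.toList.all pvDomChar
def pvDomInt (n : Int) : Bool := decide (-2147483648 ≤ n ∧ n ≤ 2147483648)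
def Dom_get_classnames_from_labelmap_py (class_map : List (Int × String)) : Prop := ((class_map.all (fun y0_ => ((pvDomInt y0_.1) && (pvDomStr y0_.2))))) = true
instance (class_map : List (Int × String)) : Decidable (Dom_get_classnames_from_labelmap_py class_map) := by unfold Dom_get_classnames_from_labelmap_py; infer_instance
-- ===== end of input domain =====

-- B replaces A's sort-all-keys-then-dedup-scan by a one-pass value→minimum-key index
-- followed by one sort of the distinct values (objective: alternative decomposition).

-- ===== PORT A =====
-- class_map is a Python dict: build it from the association list first (duplicate keys overwrite in place).
def get_classnames_from_labelmap_py (class_map : List (Int × String)) : List String :=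
  let d := PySem.Dict.ofList class_map
  let keys := PySem.List.sorted d.keys (fun k => k) false
  keys.foldl (fun class_names key =>
    match d.get? key with          -- class_map[key]; never none since key ∈ d.keys
    | some cname => if cname ∈ class_names then class_names else class_names ++ [cname]
    | none => class_names) []

-- ===== PORT B =====
def get_classnames_from_labelmap_py_alt (class_map : List (Int × String)) : List String :=
  let d := PySem.Dict.ofList class_map
  let firstkey := d.items.foldl (fun fk p =>
    match fk.get? p.2 with                             -- 'cname not in firstkey or key < firstkey[cname]'
    | none => fk.insert p.2 p.1
    | some j => if p.1 < j then fk.insert p.2 p.1 else fk) PySem.Dict.empty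
  PySem.List.sorted firstkey.keys (fun cname => firstkey.getD cname 0) false

-- ===== PRECONDITION & SPEC =====
def Spec_get_classnames_from_labelmap_py (class_map : List (Int × String)) (out : List String) : Prop := out = get_classnames_from_labelmap_py_alt class_map
instance (class_map : List (Int × String)) (out : List String) : Decidable (Spec_get_classnames_from_labelmap_py class_map out) := by unfold Spec_get_classnames_from_labelmap_py; infer_instance

-- ===== CLAIM (what is proved, stated in full; the proofs are below) =====
def Claim_equal_get_classnames_from_labelmap_py : Prop := ∀ (class_map : List (Int × String)), Dom_get_classnames_from_labelmap_py class_map → Spec_get_classnames_from_labelmap_py class_map (get_classnames_from_labelmap_py class_map)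

-- ===== LEMMAS AND PROOFS =====

-- first key in L whose value is v
def firstKey? (L : List (Int × String)) (v : String) : Option Int :=
  (L.find? (fun p => p.2 == v)).map Prod.fst

-- running minimum of the keys of pairs with value v, seeded with m
def minUpd (v : String) (m : Option Int) (p : Int × String) : Option Int :=
  if p.2 = v then
    some (match m with | none => p.1 | some j => min p.1 j)
  else m

def minKeyFrom (m : Option Int) (L : List (Int × String)) (v : String) : Option Int :=
  L.foldl (minUpd v) m

-- B's fold step
def bStep (fk : PySem.Dict String Int) (p : Int × String) : PySem.Dict String Int :=
  match fk.get? p.2 with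
  | none => fk.insert p.2 p.1
  | some j => if p.1 < j then fk.insert p.2 p.1 else fk

theorem bStep_get? (fk : PySem.Dict String Int) (p : Int × String) (v : String) :
    (bStep fk p).get? v = minUpd v (fk.get? v) p := by
  unfold bStep minUpd
  by_cases hv : p.2 = v
  · subst hv
    cases hg : fk.get? p.2 with
    | none => simp [PySem.Dict.get?_insert_self]
    | some j =>
      by_cases hlt : p.1 < j
      · simp [hlt, PySem.Dict.get?_insert_self, min_eq_left (le_of_lt hlt)]
      · simp [hlt, hg, min_eq_right (le_of_not_gt hlt)]
  · have hv' : ¬ v = p.2 := fun h => hv h.symm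
    cases hg : fk.get? p.2 with
    | none => simp [PySem.Dict.get?_insert, hv', hv]
    | some j =>
      by_cases hlt : p.1 < j
      · simp [hlt, PySem.Dict.get?_insert, hv', hv]
      · simp [hlt, hv]

theorem foldl_bStep_get? (L : List (Int × String)) (fk0 : PySem.Dict String Int) (v : String) :
    (L.foldl bStep fk0).get? v = minKeyFrom (fk0.get? v) L v := by
  induction L generalizing fk0 with
  | nil => rfl
  | cons p rest ih =>
    simp only [List.foldl_cons, minKeyFrom, ih, bStep_get?]

theorem minUpd_rightComm (v : String) (m : Option Int) (p q : Int × String) :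
    minUpd v (minUpd v m p) q = minUpd v (minUpd v m q) p := by
  unfold minUpd
  by_cases hp : p.2 = v <;> by_cases hq : q.2 = v <;> simp [hp, hq] <;> cases m <;>
    simp [min_comm p.1 q.1, min_left_comm]

theorem minKeyFrom_perm (m : Option Int) {L L' : List (Int × String)} (h : L.Perm L')
    (v : String) : minKeyFrom m L v = minKeyFrom m L' v :=
  @List.Perm.foldl_eq _ _ (minUpd v) _ _ ⟨fun b a₁ a₂ => minUpd_rightComm v b a₁ a₂⟩ h m

theorem minKeyFrom_of_lb {v : String} {j : Int} {L : List (Int × String)}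
    (h : ∀ q ∈ L, q.2 = v → j ≤ q.1) : minKeyFrom (some j) L v = some j := by
  induction L generalizing j with
  | nil => rfl
  | cons p rest ih =>
    simp only [minKeyFrom, List.foldl_cons] at *
    by_cases hp : p.2 = v
    · have hj := h p (by simp) hp
      simpa [minUpd, hp, min_eq_right hj] using
        ih (fun q hq hv => h q (by simp [hq]) hv)
    · simpa [minUpd, hp] using ih (fun q hq hv => h q (by simp [hq]) hv)

theorem minKeyFrom_eq_firstKey? {ps : List (Int × String)}
    (hpw : ps.Pairwise (fun p q => p.1 < q.1)) (v : String) :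
    minKeyFrom none ps v = firstKey? ps v := by
  induction ps with
  | nil => rfl
  | cons p rest ih =>
    rcases List.pairwise_cons.mp hpw with ⟨hlt, hrest⟩
    by_cases hp : p.2 = v
    · have h1 : minKeyFrom none (p :: rest) v = minKeyFrom (some p.1) rest v := by
        simp [minKeyFrom, minUpd, hp]
      have h2 : firstKey? (p :: rest) v = some p.1 := by
        rw [firstKey?, List.find?_cons_of_pos (by simp [hp])]; rfl
      rw [h1, h2, minKeyFrom_of_lb (fun q hq _ => le_of_lt (hlt q hq))]
    · have h1 : minKeyFrom none (p :: rest) v = minKeyFrom none rest v := by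
        simp [minKeyFrom, minUpd, hp]
      have h2 : firstKey? (p :: rest) v = firstKey? rest v := by
        rw [firstKey?, List.find?_cons_of_neg (by simp [hp]), firstKey?]
      rw [h1, h2, ih hrest]

theorem firstKey?_mem {ps : List (Int × String)} {v : String} {j : Int}
    (h : firstKey? ps v = some j) : (j, v) ∈ ps := by
  unfold firstKey? at h
  cases hf : ps.find? (fun p => p.2 == v) with
  | none => simp [hf] at h
  | some q =>
    simp [hf] at h
    have hq := List.mem_of_find?_eq_some hf
    have hv : q.2 = v := by simpa using List.find?_some hf
    have : q = (j, v) := by cases q; simp_all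
    exact this ▸ hq

theorem firstKey?_isSome_of_mem {ps : List (Int × String)} {v : String}
    (h : v ∈ ps.map Prod.snd) : ∃ j, firstKey? ps v = some j := by
  rcases List.mem_map.mp h with ⟨q, hq, hv⟩
  have : (ps.find? (fun p => p.2 == v)).isSome := by
    rw [List.find?_isSome]
    exact ⟨q, hq, by simp [hv]⟩
  rcases Option.isSome_iff_exists.mp this with ⟨r, hr⟩
  exact ⟨r.1, by simp [firstKey?, hr]⟩

-- crux: on a key-strictly-increasing pair list, the deduped value list is strictly
-- increasing under the first (= minimal) key of each value
theorem crux {ps : List (Int × String)}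
    (hpw : ps.Pairwise (fun p q => p.1 < q.1)) :
    (PySem.List.dedup (ps.map Prod.snd)).Pairwise
      (fun a b => (firstKey? ps a).getD 0 < (firstKey? ps b).getD 0) := by
  induction ps with
  | nil => simp [PySem.List.dedup]
  | cons p rest ih =>
    rcases List.pairwise_cons.mp hpw with ⟨hlt, hrest⟩
    have hded : PySem.List.dedup ((p :: rest).map Prod.snd)
        = p.2 :: PySem.Set.discard (PySem.List.dedup (rest.map Prod.snd)) p.2 := by
      simp [PySem.List.dedup_eq_ofList, PySem.Set.ofList_cons]
    rw [hded]
    constructor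
    · intro b hb
      rcases (PySem.Set.mem_discard _ _ _).mp hb with ⟨hbD, hbne⟩
      have hbmem : b ∈ rest.map Prod.snd := (PySem.List.mem_dedup _ _).mp hbD
      rcases firstKey?_isSome_of_mem hbmem with ⟨j, hj⟩
      have hjmem : (j, b) ∈ rest := firstKey?_mem hj
      have hfb : firstKey? (p :: rest) b = some j := by
        have : (p.2 == b) = false := by simpa using fun h => hbne h.symm
        simp [firstKey?, List.find?_cons_of_neg, this]
        simpa [firstKey?] using hj
      have hfp : firstKey? (p :: rest) p.2 = some p.1 := by
        simp [firstKey?, List.find?_cons_of_pos]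
      rw [hfb, hfp]
      simpa using hlt _ hjmem
    · have hsub : (PySem.Set.discard (PySem.List.dedup (rest.map Prod.snd)) p.2).Sublist
          (PySem.List.dedup (rest.map Prod.snd)) := by
        simp [PySem.Set.discard]
      refine ((ih hrest).sublist hsub).imp_of_mem ?_
      intro a b ha hb hab
      have hane : a ≠ p.2 := ((PySem.Set.mem_discard _ _ _).mp ha).2
      have hbne : b ≠ p.2 := ((PySem.Set.mem_discard _ _ _).mp hb).2
      have ea : firstKey? (p :: rest) a = firstKey? rest a := by
        have : (p.2 == a) = false := by simpa using fun h => hane h.symm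
        simp [firstKey?, List.find?_cons_of_neg, this]
      have eb : firstKey? (p :: rest) b = firstKey? rest b := by
        have : (p.2 == b) = false := by simpa using fun h => hbne h.symm
        simp [firstKey?, List.find?_cons_of_neg, this]
      rw [ea, eb]; exact hab

theorem keys_bStep (fk0 : PySem.Dict String Int) (p : Int × String) :
    (bStep fk0 p).keys = PySem.Set.add fk0.keys p.2 := by
  unfold bStep
  cases hg : fk0.get? p.2 with
  | none =>
    have hnm : p.2 ∉ fk0.keys := (PySem.Dict.get?_eq_none_iff_not_mem_keys _ _).mp hg
    have hc : fk0.contains p.2 = false := by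
      by_cases h : fk0.contains p.2 = true
      · exact absurd ((PySem.Dict.contains_iff_mem_keys _ _).mp h) hnm
      · simpa using h
    rw [PySem.Dict.keys_insert_of_not_contains _ _ hc, PySem.Set.add_eq_ite, if_neg hnm]
  | some j =>
    have hm : p.2 ∈ fk0.keys := by
      by_cases h : p.2 ∈ fk0.keys
      · exact h
      · rw [(PySem.Dict.get?_eq_none_iff_not_mem_keys _ _).mpr h] at hg; cases hg
    have hc : fk0.contains p.2 = true := (PySem.Dict.contains_iff_mem_keys _ _).mpr hm
    by_cases hlt : p.1 < j
    · simp [hlt, PySem.Dict.keys_insert_of_contains _ _ hc, hm]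
    · simp [hlt, hm]

theorem keys_foldl_bStep (L : List (Int × String)) (fk0 : PySem.Dict String Int) :
    (L.foldl bStep fk0).keys = PySem.Set.update fk0.keys (L.map Prod.snd) := by
  induction L generalizing fk0 with
  | nil => rfl
  | cons p rest ih =>
    rw [List.foldl_cons, ih, List.map_cons, PySem.Set.update_cons, keys_bStep]

theorem afold_eq_foldl_add (d : PySem.Dict Int String) (ks : List Int)
    (h : ∀ k ∈ ks, k ∈ d.keys) (acc : List String) :
    ks.foldl (fun class_names key => match d.get? key with
      | some cname => if cname ∈ class_names then class_names else class_names ++ [cname]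
      | none => class_names) acc
    = List.foldl PySem.Set.add acc (ks.map (fun k => d.getD k "")) := by
  induction ks generalizing acc with
  | nil => rfl
  | cons k rest ih =>
    cases hg : d.get? k with
    | none =>
      exact absurd (h k (by simp)) ((PySem.Dict.get?_eq_none_iff_not_mem_keys _ _).mp hg)
    | some v =>
      have hgd : d.getD k "" = v := by rw [PySem.Dict.getD_eq_get?_getD, hg]; rfl
      rw [List.foldl_cons, List.map_cons, List.foldl_cons, hgd, hg]
      rw [ih (fun k' hk' => h k' (by simp [hk'])), PySem.Set.add_eq_ite]

theorem get_classnames_from_labelmap_py_spec : Claim_equal_get_classnames_from_labelmap_py := by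
  unfold Claim_equal_get_classnames_from_labelmap_py
  intro class_map _
  unfold Spec_get_classnames_from_labelmap_py
  unfold get_classnames_from_labelmap_py get_classnames_from_labelmap_py_alt
  set d := PySem.Dict.ofList class_map with hd
  have hnd : d.keys.Nodup := PySem.Dict.nodup_keys_ofList class_map
  set ks := PySem.List.sorted d.keys (fun k => k) false with hks
  have hksperm : ks.Perm d.keys := PySem.List.sorted_perm d.keys (fun k => k) false
  have hksnd : ks.Nodup := hksperm.nodup_iff.mpr hnd
  have hkstrict : ks.Pairwise (· < ·) :=
    ((PySem.List.sorted_pairwise d.keys (fun k => k)).and hksnd).imp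
      (fun h => lt_of_le_of_ne h.1 h.2)
  set ps : List (Int × String) := ks.map (fun k => (k, d.getD k "")) with hps
  have hps_pw : ps.Pairwise (fun p q => p.1 < q.1) := by
    rw [hps, List.pairwise_map]; exact hkstrict
  have hps_perm : ps.Perm d.items := by
    rw [PySem.Dict.items_eq_map_keys d hnd ""]; exact hksperm.map _
  have hvl : ps.map Prod.snd = ks.map (fun k => d.getD k "") := by
    rw [hps, List.map_map]; rfl
  -- A's value is the deduped value list
  have hA : ks.foldl (fun class_names key => match d.get? key with
      | some cname => if cname ∈ class_names then class_names else class_names ++ [cname]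
      | none => class_names) []
      = PySem.List.dedup (ps.map Prod.snd) := by
    rw [afold_eq_foldl_add d ks (fun k hk => (PySem.List.mem_sorted d.keys (fun k => k) false k).mp hk) [],
      PySem.List.dedup_eq_ofList, hvl, PySem.Set.ofList_eq_foldl]
  -- B's dictionary
  set fk := d.items.foldl bStep PySem.Dict.empty with hfk
  have hkeys : fk.keys = PySem.Set.ofList (d.items.map Prod.snd) := by
    rw [hfk, keys_foldl_bStep, PySem.Dict.keys_empty]
    exact PySem.Set.update_empty _
  have hget : ∀ v, fk.getD v 0 = (firstKey? ps v).getD 0 := by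
    intro v
    rw [PySem.Dict.getD_eq_get?_getD, hfk, foldl_bStep_get?, PySem.Dict.get?_empty,
      minKeyFrom_perm none hps_perm.symm v, minKeyFrom_eq_firstKey? hps_pw v]
  -- the two results are a permutation of each other …
  have hperm2 : (PySem.List.dedup (ps.map Prod.snd)).Perm fk.keys := by
    rw [List.perm_ext_iff_of_nodup
      (by rw [PySem.List.dedup_eq_ofList]; exact PySem.Set.nodup_ofList _)
      (by rw [hkeys]; exact PySem.Set.nodup_ofList _)]
    intro v
    rw [PySem.List.mem_dedup, hkeys, PySem.Set.mem_ofList,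
      (hps_perm.map Prod.snd).mem_iff]
  -- … and A's is strictly increasing under B's sort key
  have hpair : (PySem.List.dedup (ps.map Prod.snd)).Pairwise
      (fun a b => fk.getD a 0 < fk.getD b 0) :=
    (crux hps_pw).imp (fun h => by rw [hget, hget]; exact h)
  calc ks.foldl (fun class_names key => match d.get? key with
      | some cname => if cname ∈ class_names then class_names else class_names ++ [cname]
      | none => class_names) []
      = PySem.List.dedup (ps.map Prod.snd) := hA
    _ = PySem.List.sorted fk.keys (fun cname => fk.getD cname 0) false :=
        (PySem.List.sorted_eq_of_perm_of_pairwise_lt fk.keys _ _ hperm2 hpair).symm
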